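-- pv_equiv track=rewrite | github.com/tamilfoundation/sjktconnect | backend/hansard/pipeline/downloader.py | _filename_from_content_disposition
-- ===== SOURCE A (Python) =====
-- def _filename_from_content_disposition(header: str) -> str:
--     """Extract filename from Content-Disposition header, if present."""
--     if not header:
--         return ""
--
--     for part in header.split(";"):
--         part = part.strip()
--         if part.lower().startswith("filename="):
--             name = part.split("=", 1)[1].strip().strip('"')
--             return name
--
--     return ""
-- ===== SOURCE B (Python) =====
-- def _filename_from_content_disposition(header: str) -> str:
--     """Extract filename from Content-Disposition header, if present."""
--     low = header.lower()
--     i = low.find("filename=")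
--     while i != -1:
--         before = header[:i].rstrip()
--         if before == "" or before.endswith(";"):
--             end = header.find(";", i)
--             value = header[i + 9:] if end == -1 else header[i + 9:end]
--             return value.strip().strip('"')
--         i = low.find("filename=", i + 1)
--     return ""
-- ===== Notes on version B (the rewrite author's own statement) =====
-- stated objective: alternative
-- what changed: A splits the header on ';' and scans the parts, strip/lower/startswith-testing each one; B never splits: it lowercases the header once, then jumps between occurrences of the substring 'filename=' with find(start), accepting the first occurrence whose left context (rstrip of the prefix before it) is empty or ends with ';', and slicing the value out up to the next ';'.
import Mathlib
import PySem

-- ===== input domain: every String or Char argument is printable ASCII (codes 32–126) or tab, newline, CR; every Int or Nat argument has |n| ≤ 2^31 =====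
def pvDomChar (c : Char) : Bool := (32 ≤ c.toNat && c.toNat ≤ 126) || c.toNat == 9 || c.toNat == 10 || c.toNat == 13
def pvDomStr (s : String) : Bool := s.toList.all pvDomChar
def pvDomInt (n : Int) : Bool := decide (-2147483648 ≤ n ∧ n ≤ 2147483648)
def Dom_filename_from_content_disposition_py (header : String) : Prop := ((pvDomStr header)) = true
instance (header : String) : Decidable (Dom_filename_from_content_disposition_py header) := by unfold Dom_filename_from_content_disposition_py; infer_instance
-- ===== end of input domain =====

set_option maxRecDepth 8192

-- B replaces A's split-on-';'-and-scan-the-parts loop by a substring search: lowercase the header once, iterate over the occurrences of "filename=" via find(start), accept the first whose left context (rstrip of the prefix) is empty or ends with ';'; objective: alternative.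

-- ===== PORT A =====
-- the [1] index is guarded with getD "" only for totality: it is unreachable (the part starts with "filename=", so '=' occurs)
def pvALoop : List String → String
  | [] => ""
  | p :: ps =>
    let part := PySem.Str.strip p
    if PySem.Str.startswith (PySem.Str.lower part) "filename=" then
      PySem.Str.stripChars (PySem.Str.strip ((PySem.List.pyGet? ((PySem.Str.splitMax? part "=" 1).getD []) 1).getD "")) "\""
    else pvALoop ps

def filename_from_content_disposition_py (header : String) : String :=
  if header = "" then ""
  else pvALoop ((PySem.Str.split? header ";").getD [])

-- ===== PORT B =====
-- fuel = len(header) + 1 bounds B's 'while i != -1': each iteration continues from i+1, and find's results strictly increase and are ≤ len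
def pvBLoop (header low : String) : Nat → Int → String
  | 0, _ => ""
  | f+1, i =>
    if i = -1 then ""
    else
      let before := PySem.Str.rstrip (PySem.Str.slice header none (some i))
      if before = "" ∨ PySem.Str.endswith before ";" = true then
        let e := PySem.Str.findFrom header ";" i none
        let value := if e = -1 then PySem.Str.slice header (some (i+9)) none
                     else PySem.Str.slice header (some (i+9)) (some e)
        PySem.Str.stripChars (PySem.Str.strip value) "\""
      else pvBLoop header low f (PySem.Str.findFrom low "filename=" (i+1) none)

def filename_from_content_disposition_py_alt (header : String) : String :=
  let low := PySem.Str.lower header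
  pvBLoop header low ((PySem.Str.len header).toNat + 1) (PySem.Str.find low "filename=")

-- ===== PRECONDITION & SPEC =====
def Spec_filename_from_content_disposition_py (header : String) (out : String) : Prop := out = filename_from_content_disposition_py_alt header
instance (header : String) (out : String) : Decidable (Spec_filename_from_content_disposition_py header out) := by unfold Spec_filename_from_content_disposition_py; infer_instance

-- ===== CLAIM (what is proved, stated in full; the proofs are below) =====
def Claim_equal_filename_from_content_disposition_py : Prop := ∀ (header : String), Dom_filename_from_content_disposition_py header → Spec_filename_from_content_disposition_py header (filename_from_content_disposition_py header)

-- ===== LEMMAS AND PROOFS =====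

-- Chars-level mirror of A's loop
def aLoopC : List (List Char) → List Char
  | [] => []
  | p :: ps =>
    let part := PySem.Chars.strip p
    if PySem.Chars.startswith (PySem.Chars.lower part) ("filename=".toList) then
      PySem.Chars.stripChars (PySem.Chars.strip ((PySem.List.pyGet? (PySem.Chars.splitOnMax part ['='] 1) 1).getD [])) ['"']
    else aLoopC ps

-- Chars-level mirror of B's loop
def bLoopC (h : List Char) : Nat → Int → List Char
  | 0, _ => []
  | f+1, i =>
    if i = -1 then []
    else
      let before := PySem.Chars.rstrip (PySem.List.slice h none (some i))
      if before = [] ∨ PySem.Chars.endswith before [';'] = true then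
        let e := PySem.Chars.findFrom h [';'] i none
        let value := if e = -1 then PySem.List.slice h (some (i+9)) none
                     else PySem.List.slice h (some (i+9)) (some e)
        PySem.Chars.stripChars (PySem.Chars.strip value) ['"']
      else bLoopC h f (PySem.Chars.findFrom (PySem.Chars.lower h) ("filename=".toList) (i+1) none)

-- proof-side intermediate: a sequential cut-at-';' scan of the header (bridges the two ports)
def bGoC : Nat → List Char → List Char
  | 0, _ => []
  | f+1, s =>
    let t := PySem.Chars.lstrip s
    if PySem.Chars.lower (PySem.List.slice t none (some 9)) = "filename=".toList then
      let k := PySem.Chars.find t [';']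
      let tail := if k = -1 then PySem.List.slice t (some 9) none else PySem.List.slice t (some 9) (some k)
      PySem.Chars.stripChars (PySem.Chars.strip tail) ['"']
    else
      let k := PySem.Chars.find s [';']
      if k = -1 then [] else bGoC f (PySem.List.slice s (some (k+1)) none)

-- the common functional description: the first index n that starts a valid 'filename=' key
def validB (h : List Char) (n : Nat) : Prop :=
  "filename=".toList <+: (PySem.Chars.lower h).drop n ∧
  (PySem.Chars.rstrip (h.take n) = [] ∨ [';'] <:+ PySem.Chars.rstrip (h.take n))

def validBb (h : List Char) (n : Nat) : Bool :=
  decide ("filename=".toList <+: (PySem.Chars.lower h).drop n) &&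
  (decide (PySem.Chars.rstrip (h.take n) = []) || decide ([';'] <:+ PySem.Chars.rstrip (h.take n)))

theorem validBb_iff (h : List Char) (n : Nat) : validBb h n = true ↔ validB h n := by
  simp [validBb, validB]

def extractAt (h : List Char) (n : Nat) : List Char :=
  let t := h.drop n
  let k := PySem.Chars.find t [';']
  PySem.Chars.stripChars (PySem.Chars.strip (if k = -1 then t.drop 9 else (t.drop 9).take (k.toNat - 9))) ['"']

def seekV (h : List Char) : Nat → Nat → Option Nat
  | _, 0 => none
  | s, f+1 => if validBb h s then some s else seekV h (s+1) f

def specRes (h : List Char) : List Char :=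
  match seekV h 0 (h.length + 1) with
  | some n => extractAt h n
  | none => []

-- ---- specRes characterization ----

theorem cand_bound (h : List Char) (n : Nat)
    (hc : "filename=".toList <+: (PySem.Chars.lower h).drop n) : n + 9 ≤ h.length := by
  have hlen := hc.length_le
  simp [List.length_drop, PySem.Chars.lower] at hlen
  have : ("filename=".toList).length = 9 := by decide
  omega

theorem seekV_none (h : List Char) : ∀ (f s : Nat), (∀ n, ¬ validB h n) → seekV h s f = none := by
  intro f
  induction f with
  | zero => intro s _; rfl
  | succ f ih =>
    intro s hall
    simp only [seekV]
    rw [if_neg (fun hx => (hall s) ((validBb_iff h s).mp hx))]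
    exact ih (s+1) hall

theorem seekV_some (h : List Char) (n : Nat) (hn : validB h n) (hmin : ∀ m, m < n → ¬ validB h m) :
    ∀ (f s : Nat), s ≤ n → n < s + f → seekV h s f = some n := by
  intro f
  induction f with
  | zero => intro s h1 h2; omega
  | succ f ih =>
    intro s h1 h2
    simp only [seekV]
    by_cases hs : s = n
    · subst hs
      rw [if_pos ((validBb_iff h s).mpr hn)]
    · rw [if_neg (by
        intro hx
        exact hmin s (by omega) ((validBb_iff h s).mp hx))]
      exact ih (s+1) (by omega) (by omega)

theorem specRes_of_none (h : List Char) (hall : ∀ n, ¬ validB h n) : specRes h = [] := by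
  simp [specRes, seekV_none h _ _ hall]

theorem specRes_of_least (h : List Char) (n : Nat) (hn : validB h n)
    (hmin : ∀ m, m < n → ¬ validB h m) : specRes h = extractAt h n := by
  have hb : n + 9 ≤ h.length := cand_bound h n hn.1
  simp [specRes, seekV_some h n hn hmin (h.length + 1) 0 (by omega) (by omega)]

-- ---- old A-side machinery: split on ';' ----

def mySplit : List Char → List (List Char)
  | [] => [[]]
  | c :: rest => if c = ';' then [] :: mySplit rest else (mySplit rest).modifyHead (c :: ·)

theorem mySplit_ne_nil (l : List Char) : mySplit l ≠ [] := by
  induction l with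
  | nil => simp [mySplit]
  | cons c rest ih =>
    simp only [mySplit]
    split
    · simp
    · cases h : mySplit rest with
      | nil => exact absurd h ih
      | cons a b => simp [List.modifyHead]

theorem mySplit_eq (l : List Char) :
    mySplit l = l.takeWhile (· ≠ ';') ::
      (if ';' ∈ l then mySplit (l.drop ((l.takeWhile (· ≠ ';')).length + 1)) else []) := by
  induction l with
  | nil => simp [mySplit]
  | cons c rest ih =>
    by_cases hc : c = ';'
    · subst hc; simp [mySplit, List.takeWhile]
    · simp only [mySplit, if_neg hc, List.takeWhile_cons, List.mem_cons]
      rw [ih]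
      simp [hc, List.modifyHead, eq_comm (a := ';') (b := c)]

theorem splitOn_go_eq (l : List Char) : ∀ (fuel : Nat) (cur : List Char) (acc : List (List Char)),
    l.length < fuel →
    PySem.Chars.splitOn.go [';'] fuel l cur acc = acc.reverse ++ (mySplit l).modifyHead (cur.reverse ++ ·) := by
  induction l with
  | nil =>
    intro fuel cur acc hf
    match fuel, hf with
    | f+1, _ => simp [PySem.Chars.splitOn.go, mySplit, List.modifyHead]
  | cons c rest ih =>
    intro fuel cur acc hf
    match fuel, hf with
    | f+1, hf =>
      simp only [List.length_cons] at hf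
      by_cases hc : c = ';'
      · subst hc
        have hpre : ([';']).isPrefixOf (';' :: rest) = true := by simp [List.isPrefixOf]
        simp only [PySem.Chars.splitOn.go, hpre, if_true, List.length_cons, List.length_nil, List.drop_succ_cons, List.drop_zero]
        rw [ih f [] (cur.reverse :: acc) (by omega)]
        simp only [mySplit]
        simp [List.modifyHead]
        cases mySplit rest <;> simp
      · have hpre : ([';']).isPrefixOf (c :: rest) = false := by
          simp [List.isPrefixOf]
          intro h; exact absurd h.symm hc
        simp only [PySem.Chars.splitOn.go, hpre, if_false, Bool.false_eq_true]
        rw [ih f (c :: cur) acc (by omega)]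
        simp only [mySplit, if_neg hc]
        cases h : mySplit rest with
        | nil => exact absurd h (mySplit_ne_nil rest)
        | cons hd tl => simp [List.modifyHead]

theorem splitOn_semicolon (l : List Char) : PySem.Chars.splitOn l [';'] = mySplit l := by
  rw [PySem.Chars.splitOn, splitOn_go_eq l (l.length+1) [] [] (by omega)]
  cases h : mySplit l with
  | nil => exact absurd h (mySplit_ne_nil l)
  | cons hd tl => simp [List.modifyHead]

theorem smgo_zero (fuel : Nat) (l cur : List Char) (acc : List (List Char)) :
    PySem.Chars.splitOnMax.go ['='] fuel 0 l cur acc = acc.reverse ++ [cur.reverse ++ l] := by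
  match fuel, l with
  | 0, l => simp [PySem.Chars.splitOnMax.go]
  | f+1, [] => simp [PySem.Chars.splitOnMax.go]
  | f+1, c :: rest => simp [PySem.Chars.splitOnMax.go]

theorem smgo_one (x : List Char) : ∀ (u cur : List Char) (acc : List (List Char)) (fuel : Nat),
    (x ++ '='::u).length < fuel → (∀ c ∈ x, c ≠ '=') →
    PySem.Chars.splitOnMax.go ['='] fuel 1 (x ++ '='::u) cur acc = acc.reverse ++ [cur.reverse ++ x, u] := by
  induction x with
  | nil =>
    intro u cur acc fuel hf _
    match fuel, hf with
    | f+1, hf =>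
      have hpre : (['=']).isPrefixOf ('=' :: u) = true := by simp [List.isPrefixOf]
      simp only [List.nil_append, PySem.Chars.splitOnMax.go, hpre, if_true]
      simp only [List.length_cons, List.length_nil, List.drop_succ_cons, List.drop_zero]
      norm_num
      rw [smgo_zero]
      simp
  | cons c x ih =>
    intro u cur acc fuel hf hx
    match fuel, hf with
    | f+1, hf =>
      have hc : c ≠ '=' := hx c (by simp)
      have hpre : (['=']).isPrefixOf (c :: (x ++ '='::u)) = false := by
        simp only [List.isPrefixOf, Bool.and_eq_false_iff]
        left
        simp [Ne.symm hc]
      rw [List.cons_append]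
      simp only [PySem.Chars.splitOnMax.go, hpre]
      norm_num
      rw [ih u (c :: cur) acc f (by simp only [List.length_append, List.length_cons] at hf ⊢; omega) (fun d hd => hx d (by simp [hd]))]
      simp

theorem splitOnMax_eq (x u : List Char) (hx : ∀ c ∈ x, c ≠ '=') :
    PySem.Chars.splitOnMax (x ++ '='::u) ['='] 1 = [x, u] := by
  rw [PySem.Chars.splitOnMax]
  rw [if_neg (by omega)]
  rw [show (1:Int).toNat = 1 from rfl]
  rw [smgo_one x u [] [] _ (by omega) hx]
  simp

theorem find_notMem (l : List Char) (a : Char) (h : a ∉ l) : PySem.Chars.find l [a] = -1 := by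
  rw [PySem.Chars.find_eq_neg_one_iff]
  intro hinf
  exact h ((List.singleton_infix_iff a l).mp hinf)

theorem find_append_cons (x b : List Char) (a : Char) (hx : a ∉ x) :
    PySem.Chars.find (x ++ a :: b) [a] = x.length := by
  have hmem : a ∈ x ++ a :: b := by simp
  have hinf : [a] <:+: x ++ a :: b := (List.singleton_infix_iff a _).mpr hmem
  have hnn : 0 ≤ PySem.Chars.find (x ++ a :: b) [a] := (PySem.Chars.find_nonneg_iff _ _).mpr hinf
  obtain ⟨h1, h2⟩ := PySem.Chars.find_spec hnn
  set v := (PySem.Chars.find (x ++ a :: b) [a]).toNat with hv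
  have hat : [a] <+: (x ++ a :: b).drop x.length := by
    simp [List.drop_left' rfl]
  have hvle : v ≤ x.length := by
    by_contra hgt
    exact h2 x.length (by omega) hat
  have hvge : x.length ≤ v := by
    by_contra hlt
    push Not at hlt
    obtain ⟨t, ht⟩ := h1
    have h0 : ((x ++ a :: b).drop v)[0]? = some a := by
      rw [← ht]; simp
    rw [List.getElem?_drop] at h0
    have hxv : (x ++ a :: b)[v + 0]? = x[v + 0]? := List.getElem?_append_left (by omega)
    rw [hxv] at h0
    exact hx (List.mem_of_getElem? h0)
  omega

theorem rstrip_append_ws (x w : List Char) (hw : ∀ c ∈ w, PySem.Chars.isspace c) :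
    PySem.Chars.rstrip (x ++ w) = PySem.Chars.rstrip x := by
  simp only [PySem.Chars.rstrip, List.reverse_append]
  congr 1
  rw [List.dropWhile_append]
  have : List.dropWhile PySem.Chars.isspace w.reverse = [] := by
    rw [List.dropWhile_eq_nil_iff]
    intro c hc
    exact hw c (List.mem_reverse.mp hc)
  simp [this]

theorem strip_append_ws (x w : List Char) (hw : ∀ c ∈ w, PySem.Chars.isspace c) :
    PySem.Chars.strip (x ++ w) = PySem.Chars.strip x := by
  simp only [PySem.Chars.strip, PySem.Chars.lstrip]
  rw [List.dropWhile_append]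
  by_cases hx : (List.dropWhile PySem.Chars.isspace x).isEmpty
  · rw [if_pos hx]
    have hweq : List.dropWhile PySem.Chars.isspace w = [] := by
      rw [List.dropWhile_eq_nil_iff]
      intro c hc; exact hw c hc
    rw [hweq]
    rw [List.isEmpty_iff] at hx
    rw [hx]
  · rw [if_neg hx]
    exact rstrip_append_ws _ _ hw

def wsTail (x : List Char) : List Char := (x.reverse.takeWhile PySem.Chars.isspace).reverse

theorem rstrip_decomp (x : List Char) :
    x = PySem.Chars.rstrip x ++ wsTail x ∧ ∀ c ∈ wsTail x, PySem.Chars.isspace c := by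
  constructor
  · show x = _ ++ _
    simp only [PySem.Chars.rstrip, wsTail]
    rw [← List.reverse_append, List.takeWhile_append_dropWhile, List.reverse_reverse]
  · intro c hc
    simp only [wsTail, List.mem_reverse] at hc
    exact List.mem_takeWhile_imp hc

theorem upper_range (c : Char) (hu : PySem.Chars.isupper c = true) :
    65 ≤ c.toNat ∧ c.toNat ≤ 90 := by
  simp only [PySem.Chars.isupper, Bool.and_eq_true, decide_eq_true_eq] at hu
  exact ⟨Char.le_def.mp hu.1, Char.le_def.mp hu.2⟩

theorem toNat_lowerChar_of_upper (c : Char) (hu : PySem.Chars.isupper c = true) :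
    (PySem.Chars.lowerChar c).toNat = c.toNat + 32 := by
  have hu' := upper_range c hu
  simp only [PySem.Chars.lowerChar]
  rw [if_pos hu]
  rw [Char.toNat_ofNat, if_pos]
  left
  omega

theorem lowerChar_eq_nonletter (c d : Char) (hd : ¬ (97 ≤ d.toNat ∧ d.toNat ≤ 122))
    (h : PySem.Chars.lowerChar c = d) : c = d := by
  by_cases hu : PySem.Chars.isupper c = true
  · exfalso
    apply hd
    rw [← h]
    rw [toNat_lowerChar_of_upper c hu]
    have hu' := upper_range c hu
    omega
  · simp only [PySem.Chars.lowerChar, hu] at h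
    simpa using h

theorem isspace_lowerChar (c : Char) : PySem.Chars.isspace (PySem.Chars.lowerChar c) = PySem.Chars.isspace c := by
  by_cases hu : PySem.Chars.isupper c = true
  · have hl := toNat_lowerChar_of_upper c hu
    obtain ⟨ha, hb⟩ := upper_range c hu
    have hf1 : PySem.Chars.isspace (PySem.Chars.lowerChar c) = false := by
      simp only [PySem.Chars.isspace, hl]
      simp only [Bool.or_eq_false_iff, Bool.and_eq_false_iff, decide_eq_false_iff_not]
      omega
    have hf2 : PySem.Chars.isspace c = false := by
      simp only [PySem.Chars.isspace]
      simp only [Bool.or_eq_false_iff, Bool.and_eq_false_iff, decide_eq_false_iff_not]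
      omega
    rw [hf1, hf2]
  · simp only [PySem.Chars.lowerChar, hu]
    simp

theorem pyGet?_map_ofList (xs : List (List Char)) (i : Int) :
    PySem.List.pyGet? (xs.map String.ofList) i = (PySem.List.pyGet? xs i).map String.ofList := by
  simp [PySem.List.pyGet?]

theorem pvALoop_eq (segs : List (List Char)) :
    pvALoop (segs.map String.ofList) = String.ofList (aLoopC segs) := by
  induction segs with
  | nil => simp [pvALoop, aLoopC]
  | cons p ps ih =>
    simp only [List.map_cons, pvALoop, aLoopC]
    have hstrip : PySem.Str.strip (String.ofList p) = String.ofList (PySem.Chars.strip p) := by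
      simp [PySem.Str.strip]
    rw [hstrip]
    have hsw : PySem.Str.startswith (PySem.Str.lower (String.ofList (PySem.Chars.strip p))) "filename="
        = PySem.Chars.startswith (PySem.Chars.lower (PySem.Chars.strip p)) ("filename=".toList) := by
      simp [PySem.Str.startswith, PySem.Str.lower]
    rw [hsw]
    split
    · simp only [PySem.Str.splitMax?, PySem.Str.stripChars, PySem.Str.strip, String.toList_ofList]
      have hsep : ("=" : String).toList = ['='] := rfl
      rw [hsep]
      rw [PySem.Chars.splitMax?]
      rw [if_neg (by simp)]
      simp only [Option.getD_some, Option.map_some]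
      rw [pyGet?_map_ofList]
      cases h : PySem.List.pyGet? (PySem.Chars.splitOnMax (PySem.Chars.strip p) "=".toList 1) 1 with
      | none => simp [PySem.Chars.stripChars, PySem.Chars.strip, PySem.Chars.lstrip, PySem.Chars.rstrip]
      | some v => simp [PySem.Chars.stripChars, PySem.Chars.strip]
    · exact ih

theorem target_list : "filename=".toList = ['f','i','l','e','n','a','m','e','='] := rfl

theorem target_semicolon : ';' ∉ "filename=".toList := by rw [target_list]; decide

theorem target_no_space : ∀ c ∈ "filename=".toList, PySem.Chars.isspace c = false := by
  rw [target_list]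
  intro c hc
  fin_cases hc <;> decide

theorem lower_length (x : List Char) : (PySem.Chars.lower x).length = x.length := by
  simp [PySem.Chars.lower]

theorem lower_take (x : List Char) (n : Nat) :
    PySem.Chars.lower (x.take n) = (PySem.Chars.lower x).take n := by
  simp [PySem.Chars.lower, List.map_take]

theorem lower_drop (x : List Char) (n : Nat) :
    PySem.Chars.lower (x.drop n) = (PySem.Chars.lower x).drop n := by
  simp [PySem.Chars.lower, List.map_drop]

theorem test_iff (seg' r : List Char) (hr : r = [] ∨ ∃ b, r = ';' :: b) :
    (PySem.Chars.lower ((seg' ++ r).take 9) = "filename=".toList) ↔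
    ("filename=".toList <+: PySem.Chars.lower (PySem.Chars.rstrip seg')) := by
  obtain ⟨hdecomp, hws⟩ := rstrip_decomp seg'
  constructor
  · intro h
    have hlen9 : ((seg' ++ r).take 9).length = 9 := by
      have := congrArg List.length h
      simpa [lower_length] using this
    have hlen2 : 9 ≤ (seg' ++ r).length := by
      rw [List.length_take] at hlen9; omega
    have h9 : 9 ≤ seg'.length := by
      by_contra hlt
      push Not at hlt
      rcases hr with rfl | ⟨b, rfl⟩
      · simp at hlen2; omega
      · have e1 : (seg' ++ ';' :: b)[seg'.length]? = some ';' := by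
          rw [List.getElem?_append_right (le_refl _)]
          simp
        have e2 : (PySem.Chars.lower ((seg' ++ ';' :: b).take 9))[seg'.length]? = some ';' := by
          simp only [PySem.Chars.lower, List.getElem?_map]
          rw [List.getElem?_take_of_lt hlt, e1]
          rfl
        rw [h] at e2
        exact absurd (List.mem_of_getElem? e2) target_semicolon
    have htake : (seg' ++ r).take 9 = seg'.take 9 := List.take_append_of_le_length h9
    rw [htake] at h
    have hc9 : 9 ≤ (PySem.Chars.rstrip seg').length := by
      by_contra hlt
      push Not at hlt
      have hwlen : (PySem.Chars.rstrip seg').length < seg'.length := by omega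
      obtain ⟨c, hc⟩ : ∃ c, seg'[(PySem.Chars.rstrip seg').length]? = some c :=
        ⟨seg'[(PySem.Chars.rstrip seg').length]'hwlen, List.getElem?_eq_getElem hwlen⟩
      have hcws : PySem.Chars.isspace c = true := by
        have e1 : seg'[(PySem.Chars.rstrip seg').length]? = (wsTail seg')[0]? := by
          obtain ⟨m, hm⟩ : ∃ m, m = (PySem.Chars.rstrip seg').length := ⟨_, rfl⟩
          rw [← hm]
          conv_lhs => rw [hdecomp]
          rw [List.getElem?_append_right hm.ge]
          rw [hm, Nat.sub_self]
        rw [e1] at hc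
        exact hws c (List.mem_of_getElem? hc)
      have e2 : (PySem.Chars.lower (seg'.take 9))[(PySem.Chars.rstrip seg').length]? =
          some (PySem.Chars.lowerChar c) := by
        simp only [PySem.Chars.lower, List.getElem?_map]
        rw [List.getElem?_take_of_lt hlt, hc]
        rfl
      rw [h] at e2
      have hns := target_no_space _ (List.mem_of_getElem? e2)
      rw [isspace_lowerChar] at hns
      rw [hcws] at hns
      exact absurd hns (by simp)
    have hctake : (PySem.Chars.rstrip seg').take 9 = seg'.take 9 := by
      conv_rhs => rw [hdecomp]
      exact (List.take_append_of_le_length hc9).symm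
    rw [← hctake, lower_take] at h
    rw [← h]
    exact List.take_prefix 9 _
  · intro h
    have hc9 : 9 ≤ (PySem.Chars.rstrip seg').length := by
      have := h.length_le
      rw [lower_length] at this
      simpa using this
    have h9 : 9 ≤ seg'.length := by
      have := congrArg List.length hdecomp
      simp at this
      omega
    have htgt : "filename=".toList = (PySem.Chars.lower (PySem.Chars.rstrip seg')).take 9 :=
      List.prefix_iff_eq_take.mp h
    have hctake : (PySem.Chars.rstrip seg').take 9 = seg'.take 9 := by
      conv_rhs => rw [hdecomp]
      exact (List.take_append_of_le_length hc9).symm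
    rw [List.take_append_of_le_length h9, ← hctake, lower_take, htgt]

theorem core_decomp (core : List Char) (h : "filename=".toList <+: PySem.Chars.lower core) :
    9 ≤ core.length ∧ core = core.take 8 ++ '=' :: core.drop 9 ∧ ∀ c ∈ core.take 8, c ≠ '=' := by
  have hc9 : 9 ≤ core.length := by
    have := h.length_le
    rw [lower_length] at this
    simpa using this
  have htgt : "filename=".toList = (PySem.Chars.lower core).take 9 :=
    List.prefix_iff_eq_take.mp h
  have h8v : core[8]? = some (core[8]'(by omega)) := List.getElem?_eq_getElem (by omega)
  have hlow8 : PySem.Chars.lowerChar (core[8]'(by omega)) = '=' := by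
    have e1 : ((PySem.Chars.lower core).take 9)[8]? = some (PySem.Chars.lowerChar (core[8]'(by omega))) := by
      rw [List.getElem?_take_of_lt (by omega)]
      simp only [PySem.Chars.lower, List.getElem?_map]
      rw [h8v]
      rfl
    rw [← htgt] at e1
    have e0 : ("filename=".toList)[8]? = some '=' := by rw [target_list]; rfl
    rw [e0] at e1
    exact (Option.some_inj.mp e1).symm
  have hcore8 : core[8]'(by omega) = '=' :=
    lowerChar_eq_nonletter _ _ (by decide) hlow8
  refine ⟨hc9, ?_, ?_⟩
  · have htake9 : core.take 9 = core.take 8 ++ ['='] := by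
      have h9s : (8:Nat) + 1 = 9 := rfl
      rw [← h9s, List.take_add_one, h8v, hcore8]
      rfl
    calc core = core.take 9 ++ core.drop 9 := (List.take_append_drop 9 core).symm
      _ = (core.take 8 ++ ['=']) ++ core.drop 9 := by rw [htake9]
      _ = core.take 8 ++ '=' :: core.drop 9 := by simp
  · intro c hc hceq
    subst hceq
    have hmemlow : PySem.Chars.lowerChar '=' ∈ PySem.Chars.lower (core.take 8) :=
      List.mem_map_of_mem hc
    rw [lower_take] at hmemlow
    have htake8 : (PySem.Chars.lower core).take 8 = ("filename=".toList).take 8 := by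
      rw [htgt, List.take_take]
      norm_num
    rw [htake8, target_list] at hmemlow
    exact absurd hmemlow (by decide)

theorem matched_val (x u core : List Char) (hcore : core = x ++ '=' :: u) (hx : ∀ c ∈ x, c ≠ '=') :
    (PySem.List.pyGet? (PySem.Chars.splitOnMax core ['='] 1) 1).getD [] = u := by
  subst hcore
  rw [splitOnMax_eq x u hx]
  simp [PySem.List.pyGet?, PySem.List.pyIdx?]

theorem drop9_strip (seg' : List Char) (hc9 : 9 ≤ (PySem.Chars.rstrip seg').length) :
    PySem.Chars.strip (seg'.drop 9) = PySem.Chars.strip ((PySem.Chars.rstrip seg').drop 9) := by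
  obtain ⟨hdecomp, hws⟩ := rstrip_decomp seg'
  conv_lhs => rw [hdecomp]
  rw [List.drop_append_of_le_length hc9]
  exact strip_append_ws _ _ hws

theorem dropWhile_head_false (p : Char → Bool) (l : List Char) (c : Char) (b : List Char)
    (h : l.dropWhile p = c :: b) : p c = false := by
  induction l with
  | nil => simp at h
  | cons a t ih =>
    rw [List.dropWhile_cons] at h
    split at h
    · exact ih h
    · rename_i hpa
      cases h
      simpa using hpa

theorem mainC : ∀ (fuel : Nat) (l : List Char), l.length < fuel → aLoopC (mySplit l) = bGoC fuel l := by
  intro fuel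
  induction fuel with
  | zero => intro l h; omega
  | succ f ih =>
    intro l hf
    have hlr : l = l.takeWhile (· ≠ ';') ++ l.dropWhile (· ≠ ';') :=
      (List.takeWhile_append_dropWhile).symm
    have hseg : ∀ c ∈ l.takeWhile (· ≠ ';'), c ≠ ';' := by
      intro c hc
      have := List.mem_takeWhile_imp hc
      simpa using this
    have hr : l.dropWhile (· ≠ ';') = [] ∨ ∃ b, l.dropWhile (· ≠ ';') = ';' :: b := by
      cases hd : l.dropWhile (· ≠ ';') with
      | nil => exact Or.inl rfl
      | cons c b =>
        right
        refine ⟨b, ?_⟩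
        have h8 := dropWhile_head_false _ _ _ _ hd
        simp at h8
        subst h8
        rfl
    have ht : PySem.Chars.lstrip l =
        PySem.Chars.lstrip (l.takeWhile (· ≠ ';')) ++ l.dropWhile (· ≠ ';') := by
      conv_lhs => rw [hlr]
      simp only [PySem.Chars.lstrip]
      rw [List.dropWhile_append]
      split
      · rename_i hemp
        rw [List.isEmpty_iff] at hemp
        rw [hemp]
        rcases hr with hnil | ⟨b, hb⟩
        · rw [hnil]; simp
        · rw [hb]
          rw [List.dropWhile_cons]
          rw [if_neg (by decide)]
          simp
      · rfl
    have hsemi_seg' : ';' ∉ PySem.Chars.lstrip (l.takeWhile (· ≠ ';')) := fun hmem =>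
      hseg ';' (List.Sublist.mem hmem (List.dropWhile_sublist _)) rfl
    have hstripdef : PySem.Chars.strip (l.takeWhile (· ≠ ';')) =
        PySem.Chars.rstrip (PySem.Chars.lstrip (l.takeWhile (· ≠ ';'))) := rfl
    have hslice9 : PySem.List.slice (PySem.Chars.lstrip l) none (some 9) =
        (PySem.Chars.lstrip (l.takeWhile (· ≠ ';')) ++ l.dropWhile (· ≠ ';')).take 9 := by
      rw [PySem.List.slice_to _ (by norm_num), ht]
      rfl
    rw [mySplit_eq l]
    simp only [aLoopC, bGoC]
    by_cases hA : "filename=".toList <+: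
        PySem.Chars.lower (PySem.Chars.rstrip (PySem.Chars.lstrip (l.takeWhile (· ≠ ';'))))
    · -- matched: both return the extracted filename
      have hsw : PySem.Chars.startswith
          (PySem.Chars.lower (PySem.Chars.strip (l.takeWhile (· ≠ ';')))) ("filename=".toList) = true := by
        rw [hstripdef]
        exact (PySem.Chars.startswith_iff _ _).mpr hA
      rw [if_pos hsw]
      have hB : PySem.Chars.lower (PySem.List.slice (PySem.Chars.lstrip l) none (some 9)) =
          "filename=".toList := by
        rw [hslice9]
        exact (test_iff _ _ hr).mpr hA
      rw [if_pos hB]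
      obtain ⟨hc9, hdec, hc8⟩ := core_decomp _ hA
      rw [hstripdef, matched_val _ _ _ hdec hc8]
      have h9seg' : 9 ≤ (PySem.Chars.lstrip (l.takeWhile (· ≠ ';'))).length := by
        obtain ⟨hdecomp, _⟩ := rstrip_decomp (PySem.Chars.lstrip (l.takeWhile (· ≠ ';')))
        have hlen := congrArg List.length hdecomp
        rw [List.length_append] at hlen
        omega
      -- the tail bGoC extracts is seg'.drop 9 in both find-branches
      have htail : (if PySem.Chars.find (PySem.Chars.lstrip l) [';'] = -1 then
            PySem.List.slice (PySem.Chars.lstrip l) (some 9) none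
          else PySem.List.slice (PySem.Chars.lstrip l) (some 9)
            (some (PySem.Chars.find (PySem.Chars.lstrip l) [';']))) =
          (PySem.Chars.lstrip (l.takeWhile (· ≠ ';'))).drop 9 := by
        rcases hr with hnil | ⟨b, hb⟩
        · rw [ht, hnil, List.append_nil]
          rw [if_pos (find_notMem _ _ hsemi_seg')]
          rw [PySem.List.slice_from _ (by norm_num)]
          rfl
        · rw [ht, hb]
          rw [find_append_cons _ _ _ hsemi_seg']
          rw [if_neg (by omega)]
          rw [show (9:Int) = ((9:Nat):Int) from rfl]
          rw [PySem.List.slice_natCast]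
          rw [List.drop_append_of_le_length (by omega)]
          rw [List.take_left' (by rw [List.length_drop])]
      rw [htail]
      rw [drop9_strip _ hc9]
    · -- unmatched: both skip to the next part
      have hsw : PySem.Chars.startswith
          (PySem.Chars.lower (PySem.Chars.strip (l.takeWhile (· ≠ ';')))) ("filename=".toList) = false := by
        rw [hstripdef]
        rw [Bool.eq_false_iff]
        intro hx
        exact hA ((PySem.Chars.startswith_iff _ _).mp hx)
      rw [if_neg (by rw [hsw]; simp)]
      have hB : ¬ (PySem.Chars.lower (PySem.List.slice (PySem.Chars.lstrip l) none (some 9)) =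
          "filename=".toList) := by
        rw [hslice9]
        intro hx
        exact hA ((test_iff _ _ hr).mp hx)
      rw [if_neg hB]
      by_cases hmem : ';' ∈ l
      · rw [if_pos hmem]
        have hbcase : ∃ b, l.dropWhile (· ≠ ';') = ';' :: b := by
          rcases hr with hnil | hb
          · exfalso
            rw [hlr, hnil, List.append_nil] at hmem
            exact hseg ';' hmem rfl
          · exact hb
        obtain ⟨b, hb⟩ := hbcase
        have hleq : l = l.takeWhile (· ≠ ';') ++ ';' :: b := by
          conv_lhs => rw [hlr]
          rw [hb]
        have hfind : PySem.Chars.find l [';'] = ((l.takeWhile (· ≠ ';')).length : Int) := by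
          conv_lhs => rw [hleq]
          exact find_append_cons _ _ _ (fun hm => hseg ';' hm rfl)
        rw [hfind]
        rw [if_neg (by omega)]
        have hsl : PySem.List.slice l (some (((l.takeWhile (· ≠ ';')).length : Int) + 1)) none =
            l.drop ((l.takeWhile (· ≠ ';')).length + 1) := by
          rw [show ((l.takeWhile (· ≠ ';')).length : Int) + 1 =
              (((l.takeWhile (· ≠ ';')).length + 1 : Nat) : Int) by push_cast; ring]
          rw [PySem.List.slice_from _ (by positivity)]
          simp
        rw [hsl]
        have hdropb : l.drop ((l.takeWhile (· ≠ ';')).length + 1) = b := by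
          obtain ⟨x, hx⟩ : ∃ x, x = l.takeWhile (· ≠ ';') := ⟨_, rfl⟩
          rw [← hx]
          conv_lhs => rw [hleq, ← hx]
          rw [show x.length + 1 = (x ++ [';']).length by simp]
          rw [show x ++ ';' :: b = (x ++ [';']) ++ b by simp]
          exact List.drop_left
        rw [hdropb]
        apply ih
        have hlen := congrArg List.length hleq
        simp at hlen
        omega
      · rw [if_neg hmem]
        rw [if_pos (find_notMem _ _ hmem)]
        rfl

-- ---- new lemmas: both scans compute specRes ----

theorem bLoop_correct (h : List Char) : ∀ (fuel s : Nat), h.length < fuel + s → s ≤ h.length →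
    (∀ m, m < s → ¬ validB h m) →
    bLoopC h fuel (PySem.Chars.findFrom (PySem.Chars.lower h) ("filename=".toList) (s : Int) none) = specRes h := by
  intro fuel
  induction fuel with
  | zero => intro s h1 h2 h3; omega
  | succ f ih =>
    intro s hfs hsl hmin
    have hsl' : s ≤ (PySem.Chars.lower h).length := by rw [lower_length]; exact hsl
    by_cases hneg : PySem.Chars.findFrom (PySem.Chars.lower h) ("filename=".toList) (s : Int) none = -1
    · rw [hneg]
      simp only [bLoopC]
      rw [if_pos trivial]
      rw [specRes_of_none]
      intro n hv
      by_cases hn : n < s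
      · exact hmin n hn hv
      · have hnoinf := (PySem.Chars.findFrom_natCast_eq_neg_one_iff _ _ s hsl').mp hneg
        apply hnoinf
        have hpre : "filename=".toList <+: ((PySem.Chars.lower h).drop s).drop (n - s) := by
          rw [List.drop_drop]
          rw [show s + (n - s) = n by omega]
          exact hv.1
        exact hpre.isInfix.trans (List.drop_suffix (n - s) _).isInfix
    · obtain ⟨hsi, hcand, hminf⟩ :=
        PySem.Chars.findFrom_natCast_spec (PySem.Chars.lower h) ("filename=".toList) s hsl' hneg
      set i := PySem.Chars.findFrom (PySem.Chars.lower h) ("filename=".toList) (s : Int) none with hidef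
      have hi0 : 0 ≤ i := le_trans (by positivity) hsi
      have hin : i = (i.toNat : Int) := by omega
      set n := i.toNat with hndef
      have hcand' : "filename=".toList <+: (PySem.Chars.lower h).drop n := hcand
      have hnb : n + 9 ≤ h.length := cand_bound h n hcand'
      have hsn : s ≤ n := by omega
      have hminh : ∀ m, m < n → ¬ validB h m := by
        intro m hm hv
        by_cases hms : m < s
        · exact hmin m hms hv
        · exact hminf m (by omega) (by omega) hv.1
      simp only [bLoopC]
      rw [if_neg hneg]
      have hslice : PySem.List.slice h none (some i) = h.take n := by
        rw [PySem.List.slice_to _ hi0]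
      rw [hslice]
      by_cases hC : PySem.Chars.rstrip (h.take n) = [] ∨ [';'] <:+ PySem.Chars.rstrip (h.take n)
      · have hvalid : validB h n := ⟨hcand', hC⟩
        rw [specRes_of_least h n hvalid hminh]
        rw [if_pos (by
          rcases hC with hC | hC
          · exact Or.inl hC
          · exact Or.inr ((PySem.Chars.endswith_iff _ _).mpr hC))]
        have he : PySem.Chars.findFrom h [';'] i none =
            (if PySem.Chars.find (h.drop n) [';'] = -1 then -1
             else (n : Int) + PySem.Chars.find (h.drop n) [';']) := by
          rw [hin]
          exact PySem.Chars.findFrom_natCast h [';'] n (by omega)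
        rw [he]
        set k := PySem.Chars.find (h.drop n) [';'] with hkdef
        have hk1 : -1 ≤ k := PySem.Chars.neg_one_le_find _ _
        by_cases hk : k = -1
        · rw [if_pos hk]
          rw [if_pos rfl]
          have hv1 : PySem.List.slice h (some (i + 9)) none = (h.drop n).drop 9 := by
            rw [show i + 9 = ((n + 9 : Nat) : Int) by omega]
            rw [PySem.List.slice_from_natCast]
            rw [List.drop_drop]
          rw [hv1]
          simp only [extractAt]
          rw [if_pos hk]
        · rw [if_neg hk]
          rw [if_neg (by omega)]
          have hv2 : PySem.List.slice h (some (i + 9)) (some ((n : Int) + k)) =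
              ((h.drop n).drop 9).take (k.toNat - 9) := by
            rw [show i + 9 = ((n + 9 : Nat) : Int) by omega]
            rw [show (n : Int) + k = ((n + k.toNat : Nat) : Int) by omega]
            rw [PySem.List.slice_natCast]
            rw [List.drop_drop]
            congr 1
            omega
          rw [hv2]
          simp only [extractAt]
          rw [if_neg hk]
      · rw [if_neg (by
          intro hx
          rcases hx with hx | hx
          · exact hC (Or.inl hx)
          · exact hC (Or.inr ((PySem.Chars.endswith_iff _ _).mp hx)))]
        rw [show i + 1 = ((n + 1 : Nat) : Int) by omega]
        apply ih (n + 1) (by omega) (by omega)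
        intro m hm
        by_cases hmn : m < n
        · exact hminh m hmn
        · have hmeq : m = n := by omega
          subst hmeq
          intro hv
          exact hC hv.2

theorem lstrip_eq_drop (h : List Char) :
    PySem.Chars.lstrip h = h.drop (h.takeWhile PySem.Chars.isspace).length := by
  have hsplit : h.takeWhile PySem.Chars.isspace ++ h.dropWhile PySem.Chars.isspace = h :=
    List.takeWhile_append_dropWhile
  show h.dropWhile PySem.Chars.isspace = _
  calc h.dropWhile PySem.Chars.isspace
      = (h.takeWhile PySem.Chars.isspace ++ h.dropWhile PySem.Chars.isspace).drop
          (h.takeWhile PySem.Chars.isspace).length := by rw [List.drop_left]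
    _ = h.drop (h.takeWhile PySem.Chars.isspace).length := by rw [hsplit]

theorem rstrip_eq_nil_iff (x : List Char) :
    PySem.Chars.rstrip x = [] ↔ ∀ c ∈ x, PySem.Chars.isspace c := by
  simp only [PySem.Chars.rstrip, List.reverse_eq_nil_iff, List.dropWhile_eq_nil_iff,
    List.mem_reverse]

theorem rstrip_prefix (x : List Char) : PySem.Chars.rstrip x <+: x := by
  obtain ⟨hdec, _⟩ := rstrip_decomp x
  exact ⟨wsTail x, hdec.symm⟩

theorem rstrip_append (A B : List Char) :
    PySem.Chars.rstrip (A ++ B) =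
      if PySem.Chars.rstrip B = [] then PySem.Chars.rstrip A else A ++ PySem.Chars.rstrip B := by
  simp only [PySem.Chars.rstrip, List.reverse_append]
  rw [List.dropWhile_append]
  by_cases hB : (List.dropWhile PySem.Chars.isspace B.reverse).isEmpty
  · rw [if_pos hB]
    rw [List.isEmpty_iff] at hB
    rw [if_pos (by rw [hB]; rfl)]
  · rw [if_neg hB]
    rw [List.isEmpty_iff] at hB
    rw [if_neg (by
      intro hx
      exact hB (by simpa using congrArg List.reverse hx))]
    simp

theorem singleton_suffix_iff (a : Char) (l : List Char) :
    [a] <:+ l ↔ l.getLast? = some a := by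
  constructor
  · rintro ⟨u, rfl⟩
    simp
  · intro hla
    have hne : l ≠ [] := by
      intro hnil
      rw [hnil] at hla
      simp at hla
    refine ⟨l.dropLast, ?_⟩
    have := List.dropLast_append_getLast hne
    rw [List.getLast?_eq_getLast_of_ne_nil hne] at hla
    rw [Option.some_inj.mp hla] at this
    exact this

theorem no_valid_in_ws (h : List Char) (n : Nat)
    (hn : n < (h.takeWhile PySem.Chars.isspace).length) : ¬ validB h n := by
  intro hv
  have hnl : n < h.length := lt_of_lt_of_le hn (List.takeWhile_prefix _).length_le
  have htw : h.takeWhile PySem.Chars.isspace = h.take (h.takeWhile PySem.Chars.isspace).length :=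
    List.prefix_iff_eq_take.mp (List.takeWhile_prefix _)
  obtain ⟨c, hc⟩ : ∃ c, h[n]? = some c := ⟨h[n]'hnl, List.getElem?_eq_getElem hnl⟩
  have hcs : PySem.Chars.isspace c = true := by
    have e1 : (h.takeWhile PySem.Chars.isspace)[n]? = some c := by
      rw [htw, List.getElem?_take_of_lt hn]
      exact hc
    exact List.mem_takeWhile_imp (List.mem_of_getElem? e1)
  obtain ⟨t, ht⟩ := hv.1
  have h0 : ((PySem.Chars.lower h).drop n)[0]? = some 'f' := by
    rw [← ht]
    rw [target_list]
    rfl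
  rw [List.getElem?_drop] at h0
  have h0' : (PySem.Chars.lower h)[n + 0]? = some (PySem.Chars.lowerChar c) := by
    simp only [PySem.Chars.lower, List.getElem?_map, Nat.add_zero]
    rw [hc]
    rfl
  rw [h0'] at h0
  have hfc : PySem.Chars.lowerChar c = 'f' := Option.some_inj.mp h0
  have := isspace_lowerChar c
  rw [hfc, hcs] at this
  exact absurd this (by decide)

theorem valid_ws_matched (h : List Char) (n : Nat) (hv : validB h n)
    (hws : ∀ c ∈ h.take n, PySem.Chars.isspace c) :
    PySem.Chars.lower ((PySem.Chars.lstrip h).take 9) = "filename=".toList := by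
  have hnb : n + 9 ≤ h.length := cand_bound h n hv.1
  set w := (h.takeWhile PySem.Chars.isspace).length with hwdef
  have hnw : n = w := by
    by_cases hlt : n < w
    · exact absurd hv (no_valid_in_ws h n hlt)
    · by_cases hgt : w < n
      · exfalso
        have hwl : w < h.length := by omega
        have hdw : PySem.Chars.lstrip h = h.drop w := lstrip_eq_drop h
        have hcons : h.drop w = h[w]'hwl :: h.drop (w+1) := List.drop_eq_getElem_cons hwl
        have hnws : PySem.Chars.isspace (h[w]'hwl) = false := by
          apply dropWhile_head_false PySem.Chars.isspace h
          show h.dropWhile PySem.Chars.isspace = _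
          rw [show (h.dropWhile PySem.Chars.isspace) = PySem.Chars.lstrip h from rfl, hdw, hcons]
        have hmem : h[w]'hwl ∈ h.take n := by
          apply List.mem_of_getElem? (i := w)
          rw [List.getElem?_take_of_lt hgt]
          exact List.getElem?_eq_getElem hwl
        rw [hws _ hmem] at hnws
        exact absurd hnws (by simp)
      · omega
  subst hnw
  have ht : PySem.Chars.lstrip h = h.drop w := lstrip_eq_drop h
  rw [ht]
  have hpre : "filename=".toList <+: PySem.Chars.lower (h.drop w) := by
    rw [lower_drop]
    exact hv.1
  have htgt : "filename=".toList = (PySem.Chars.lower (h.drop w)).take 9 :=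
    List.prefix_iff_eq_take.mp hpre
  rw [lower_take, ← htgt]

theorem valid_no_semi_ws (h : List Char) (n : Nat) (hv : validB h n)
    (hsemi : ';' ∉ h.take n) : ∀ c ∈ h.take n, PySem.Chars.isspace c := by
  rcases hv.2 with hnil | hsuf
  · exact (rstrip_eq_nil_iff _).mp hnil
  · exfalso
    apply hsemi
    exact (rstrip_prefix (h.take n)).sublist.mem (hsuf.sublist.mem (by simp))

theorem drop_append_len (l₁ l₂ : List Char) (n : Nat) :
    (l₁ ++ l₂).drop (l₁.length + n) = l₂.drop n := by
  rw [List.drop_append, List.drop_of_length_le (by omega), Nat.add_sub_cancel_left]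
  simp

theorem take_append_len (l₁ l₂ : List Char) (n : Nat) :
    (l₁ ++ l₂).take (l₁.length + n) = l₁ ++ l₂.take n := by
  rw [List.take_append, List.take_of_length_le (by omega), Nat.add_sub_cancel_left]

theorem rstrip_semi_concat (x : List Char) : PySem.Chars.rstrip (x ++ [';']) = x ++ [';'] := by
  rw [rstrip_append]
  rw [if_neg (by decide)]
  rw [show PySem.Chars.rstrip [';'] = [';'] from rfl]

theorem valid_shift (x y : List Char) (j : Nat) :
    validB (x ++ ';' :: y) (x.length + 1 + j) ↔ validB y j := by
  have hcons : x ++ ';' :: y = (x ++ [';']) ++ y := by simp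
  have hlow : PySem.Chars.lower (x ++ ';' :: y) =
      (PySem.Chars.lower x ++ [';']) ++ PySem.Chars.lower y := by
    simp [PySem.Chars.lower]
    rfl
  have hdrop : (PySem.Chars.lower (x ++ ';' :: y)).drop (x.length + 1 + j) =
      (PySem.Chars.lower y).drop j := by
    rw [hlow]
    rw [show x.length + 1 + j = (PySem.Chars.lower x ++ [';']).length + j by
      simp [lower_length]]
    exact drop_append_len _ _ j
  have htake : (x ++ ';' :: y).take (x.length + 1 + j) = (x ++ [';']) ++ y.take j := by
    rw [hcons]
    rw [show x.length + 1 + j = (x ++ [';']).length + j by simp]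
    exact take_append_len _ _ j
  have hrs : PySem.Chars.rstrip ((x ++ ';' :: y).take (x.length + 1 + j)) =
      if PySem.Chars.rstrip (y.take j) = [] then x ++ [';']
      else (x ++ [';']) ++ PySem.Chars.rstrip (y.take j) := by
    rw [htake, rstrip_append, rstrip_semi_concat]
  unfold validB
  rw [hdrop, hrs]
  by_cases hR : PySem.Chars.rstrip (y.take j) = []
  · rw [if_pos hR]
    constructor
    · rintro ⟨h1, _⟩
      exact ⟨h1, Or.inl hR⟩
    · rintro ⟨h1, _⟩
      exact ⟨h1, Or.inr ⟨x, rfl⟩⟩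
  · rw [if_neg hR]
    constructor
    · rintro ⟨h1, h2⟩
      refine ⟨h1, Or.inr ?_⟩
      rcases h2 with h2 | h2
      · exact absurd h2 (by simp)
      · rw [singleton_suffix_iff] at h2 ⊢
        rw [List.getLast?_append_of_ne_nil (x ++ [';']) hR] at h2
        exact h2
    · rintro ⟨h1, h2⟩
      refine ⟨h1, Or.inr ?_⟩
      rcases h2 with h2 | h2
      · exact absurd h2 hR
      · rw [singleton_suffix_iff] at h2 ⊢
        rw [List.getLast?_append_of_ne_nil (x ++ [';']) hR]
        exact h2

theorem no_valid_front (h : List Char) (m : Nat) (_hm : m ≤ h.length)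
    (hsemi : ';' ∉ h.take m)
    (hT : ¬ PySem.Chars.lower ((PySem.Chars.lstrip h).take 9) = "filename=".toList) :
    ∀ n, n ≤ m → ¬ validB h n := by
  intro n hn hv
  have htt : h.take n = (h.take m).take n := by
    rw [List.take_take]
    congr 1
    omega
  have hsemi' : ';' ∉ h.take n := by
    rw [htt]
    intro hmem
    exact hsemi ((List.take_prefix n (h.take m)).sublist.mem hmem)
  exact hT (valid_ws_matched h n hv (valid_no_semi_ws h n hv hsemi'))

theorem bGoC_correct : ∀ (fuel : Nat) (h : List Char), h.length < fuel → bGoC fuel h = specRes h := by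
  intro fuel
  induction fuel with
  | zero => intro h hf; omega
  | succ f ih =>
    intro h hf
    simp only [bGoC]
    have hslice9 : PySem.List.slice (PySem.Chars.lstrip h) none (some 9) =
        (PySem.Chars.lstrip h).take 9 := by
      rw [PySem.List.slice_to _ (by norm_num)]
      rw [show ((9 : Int)).toNat = 9 from rfl]
    by_cases hT : PySem.Chars.lower ((PySem.Chars.lstrip h).take 9) = "filename=".toList
    · -- matched at the first non-whitespace position
      rw [if_pos (by rw [hslice9]; exact hT)]
      set w := (h.takeWhile PySem.Chars.isspace).length with hwdef
      have ht : PySem.Chars.lstrip h = h.drop w := lstrip_eq_drop h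
      have hpre : "filename=".toList <+: (PySem.Chars.lower h).drop w := by
        rw [← lower_drop, ← ht]
        have h9 : 9 ≤ (PySem.Chars.lstrip h).length := by
          have := congrArg List.length hT
          rw [lower_length, List.length_take] at this
          have h9' : ("filename=".toList).length = 9 := by decide
          omega
        have hsplitl : PySem.Chars.lower (PySem.Chars.lstrip h) =
            "filename=".toList ++ PySem.Chars.lower ((PySem.Chars.lstrip h).drop 9) := by
          conv_lhs => rw [← List.take_append_drop 9 (PySem.Chars.lstrip h)]
          rw [show PySem.Chars.lower ((PySem.Chars.lstrip h).take 9 ++ (PySem.Chars.lstrip h).drop 9)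
              = PySem.Chars.lower ((PySem.Chars.lstrip h).take 9) ++
                PySem.Chars.lower ((PySem.Chars.lstrip h).drop 9) by simp [PySem.Chars.lower]]
          rw [hT]
        exact ⟨_, hsplitl.symm⟩
      have hvalid : validB h w := by
        refine ⟨hpre, Or.inl ?_⟩
        rw [rstrip_eq_nil_iff]
        intro c hc
        have htw : h.take w = h.takeWhile PySem.Chars.isspace :=
          (List.prefix_iff_eq_take.mp (List.takeWhile_prefix _)).symm
        rw [htw] at hc
        exact List.mem_takeWhile_imp hc
      rw [specRes_of_least h w hvalid (fun m hm => no_valid_in_ws h m hm)]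
      simp only [extractAt]
      rw [← ht]
      set k := PySem.Chars.find (PySem.Chars.lstrip h) [';'] with hkdef
      have hk1 : -1 ≤ k := PySem.Chars.neg_one_le_find _ _
      by_cases hk : k = -1
      · rw [if_pos hk, if_pos hk]
        rw [PySem.List.slice_from _ (by norm_num)]
        rw [show ((9 : Int)).toNat = 9 from rfl]
      · rw [if_neg hk, if_neg hk]
        rw [show (9 : Int) = ((9 : Nat) : Int) from rfl, show k = ((k.toNat : Nat) : Int) by omega]
        rw [PySem.List.slice_natCast]
        rw [show (((k.toNat : Nat) : Int)).toNat = k.toNat from by omega]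
    · rw [if_neg (by rw [hslice9]; exact hT)]
      set k := PySem.Chars.find h [';'] with hkdef
      have hk1 : -1 ≤ k := PySem.Chars.neg_one_le_find _ _
      by_cases hk : k = -1
      · rw [if_pos hk]
        rw [specRes_of_none]
        intro n hv
        have hmem : ';' ∉ h := by
          intro hmem
          have hfind : PySem.Chars.find h [';'] = -1 := by rw [← hkdef]; exact hk
          exact (PySem.Chars.find_eq_neg_one_iff h [';']).mp hfind
            ((List.singleton_infix_iff ';' h).mpr hmem)
        have hsemi : ';' ∉ h.take h.length := by
          rw [List.take_length]
          exact hmem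
        exact no_valid_front h h.length (le_refl _) hsemi hT n
          (by
            have := cand_bound h n hv.1
            omega) hv
      · rw [if_neg hk]
        have hk0 : 0 ≤ k := by omega
        obtain ⟨hat, hmin⟩ := PySem.Chars.find_spec (hkdef ▸ hk0)
        set m := k.toNat with hmdef
        have hml : m < h.length := by
          have := hat.length_le
          rw [List.length_drop] at this
          have h1 : ([';'] : List Char).length = 1 := rfl
          omega
        have hcm : h[m]'hml = ';' := by
          obtain ⟨t, htl⟩ := hat
          have h0 : (h.drop m)[0]? = some ';' := by rw [← htl]; rfl
          rw [List.getElem?_drop] at h0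
          have := List.getElem?_eq_getElem (l := h) (i := m + 0) (by omega)
          rw [this] at h0
          simpa using h0
        have hdm : h.drop m = ';' :: h.drop (m + 1) := by
          rw [List.drop_eq_getElem_cons hml, hcm]
        have hxdef : h = h.take m ++ ';' :: h.drop (m + 1) := by
          conv_lhs => rw [← List.take_append_drop m h]
          rw [hdm]
        have hxsemi : ';' ∉ h.take m := by
          intro hmem
          obtain ⟨j, hj, hje⟩ := List.getElem_of_mem hmem
          have hjm : j < m := by
            have := hj
            rw [List.length_take] at this
            omega
          apply hmin j hjm
          rw [List.getElem_take] at hje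
          refine ⟨h.drop (j + 1), ?_⟩
          rw [List.drop_eq_getElem_cons (show j < h.length by omega)]
          simp [hje]
        have hxlen : (h.take m).length = m := by
          rw [List.length_take]
          omega
        -- recurse on the tail after the first ';'
        have hrec : PySem.List.slice h (some (k + 1)) none = h.drop (m + 1) := by
          rw [show k + 1 = ((m + 1 : Nat) : Int) by omega]
          rw [PySem.List.slice_from_natCast]
        rw [hrec]
        rw [ih (h.drop (m + 1)) (by rw [List.length_drop]; omega)]
        -- specRes is invariant under cutting the unmatched first part
        set y := h.drop (m + 1) with hydef
        have hshift : ∀ j, validB h (m + 1 + j) ↔ validB y j := by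
          intro j
          conv_lhs => rw [hxdef]
          rw [show m + 1 + j = (h.take m).length + 1 + j by rw [hxlen]]
          exact valid_shift (h.take m) y j
        have hfront : ∀ n, n ≤ m → ¬ validB h n :=
          no_valid_front h m (by omega) hxsemi hT
        by_cases hex : ∃ j, validB y j
        · obtain ⟨j1, hj1⟩ := hex
          have hexb : ∃ j, validBb y j = true := ⟨j1, (validBb_iff y j1).mpr hj1⟩
          set j0 := Nat.find hexb with hj0def
          have hvy : validB y j0 := (validBb_iff y j0).mp (Nat.find_spec hexb)
          have hminy : ∀ j, j < j0 → ¬ validB y j := by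
            intro j hj hv
            exact (Nat.find_min hexb hj) ((validBb_iff y j).mpr hv)
          rw [specRes_of_least y j0 hvy hminy]
          rw [specRes_of_least h (m + 1 + j0) ((hshift j0).mpr hvy) ?_]
          · simp only [extractAt]
            rw [show h.drop (m + 1 + j0) = y.drop j0 by rw [hydef, ← List.drop_drop]]
          · intro n hn
            by_cases hnm : n ≤ m
            · exact hfront n hnm
            · intro hv
              have hn' : n = m + 1 + (n - m - 1) := by omega
              rw [hn'] at hv
              exact hminy (n - m - 1) (by omega) ((hshift _).mp hv)
        · rw [specRes_of_none y (fun j hj => hex ⟨j, hj⟩)]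
          rw [specRes_of_none h]
          intro n hv
          by_cases hnm : n ≤ m
          · exact hfront n hnm hv
          · have hn' : n = m + 1 + (n - m - 1) := by omega
            rw [hn'] at hv
            exact hex ⟨n - m - 1, (hshift _).mp hv⟩

-- ---- Str ↔ Chars bridges for the ports ----

theorem ofList_eq_empty_iff (l : List Char) : String.ofList l = "" ↔ l = [] := by
  constructor
  · intro h
    have := congrArg String.toList h
    simpa using this
  · rintro rfl; rfl

theorem pvBLoop_eq (header : String) : ∀ (fuel : Nat) (i : Int),
    pvBLoop header (PySem.Str.lower header) fuel i = String.ofList (bLoopC header.toList fuel i) := by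
  intro fuel
  induction fuel with
  | zero => intro i; rfl
  | succ f ih =>
    intro i
    simp only [pvBLoop, bLoopC]
    by_cases hi : i = -1
    · rw [if_pos hi, if_pos hi]
    · rw [if_neg hi, if_neg hi]
      have hbefore : PySem.Str.rstrip (PySem.Str.slice header none (some i)) =
          String.ofList (PySem.Chars.rstrip (PySem.List.slice header.toList none (some i))) := by
        simp [PySem.Str.rstrip, PySem.Str.slice]
      rw [hbefore]
      have hends : PySem.Str.endswith
          (String.ofList (PySem.Chars.rstrip (PySem.List.slice header.toList none (some i)))) ";" =
          PySem.Chars.endswith (PySem.Chars.rstrip (PySem.List.slice header.toList none (some i))) [';'] := by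
        simp [PySem.Str.endswith]
      by_cases hc : PySem.Chars.rstrip (PySem.List.slice header.toList none (some i)) = [] ∨
          PySem.Chars.endswith (PySem.Chars.rstrip (PySem.List.slice header.toList none (some i))) [';'] = true
      · rw [if_pos (by rw [ofList_eq_empty_iff, hends]; exact hc), if_pos hc]
        have he : PySem.Str.findFrom header ";" i none =
            PySem.Chars.findFrom header.toList [';'] i none := by
          simp [PySem.Str.findFrom_eq]
        rw [he]
        by_cases hke : PySem.Chars.findFrom header.toList [';'] i none = -1
        · rw [if_pos hke, if_pos hke]
          simp [PySem.Str.stripChars, PySem.Str.strip, PySem.Str.slice]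
        · rw [if_neg hke, if_neg hke]
          simp [PySem.Str.stripChars, PySem.Str.strip, PySem.Str.slice]
      · rw [if_neg (by rw [ofList_eq_empty_iff, hends]; exact hc), if_neg hc]
        have hrec : PySem.Str.findFrom (PySem.Str.lower header) "filename=" (i+1) none =
            PySem.Chars.findFrom (PySem.Chars.lower header.toList) ("filename=".toList) (i+1) none := by
          simp [PySem.Str.findFrom_eq, PySem.Str.lower]
        rw [hrec]
        exact ih _


-- ===== VERDICT (by name: the statement is the Claim_ definition above) =====
theorem filename_from_content_disposition_py_spec : Claim_equal_filename_from_content_disposition_py := by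
  intro header _
  show filename_from_content_disposition_py header = filename_from_content_disposition_py_alt header
  unfold filename_from_content_disposition_py filename_from_content_disposition_py_alt
  simp only []
  rw [pvBLoop_eq]
  have hfind : PySem.Str.find (PySem.Str.lower header) "filename=" =
      PySem.Chars.findFrom (PySem.Chars.lower header.toList) ("filename=".toList) ((0 : Nat) : Int) none := by
    simp [PySem.Str.find, PySem.Str.lower]
  have hlen : (PySem.Str.len header).toNat = header.toList.length := by
    simp [PySem.Str.len]
  rw [hfind, hlen]
  rw [bLoop_correct header.toList (header.toList.length + 1) 0 (by omega) (by omega) (by omega)]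
  by_cases h0 : header = ""
  · subst h0
    rw [if_pos rfl]
    rw [specRes_of_none _ (by
      intro n hv
      have := cand_bound _ _ hv.1
      simp at this)]
  · rw [if_neg h0]
    have hsplit : PySem.Str.split? header ";" = some ((PySem.Chars.splitOn header.toList [';']).map String.ofList) := by
      simp [PySem.Str.split?, PySem.Chars.split?]
    rw [hsplit]
    simp only [Option.getD_some]
    rw [splitOn_semicolon, pvALoop_eq]
    rw [mainC (header.toList.length + 1) _ (by omega)]
    rw [bGoC_correct _ _ (by omega)]
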